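-- pv_equiv track=rewrite | github.com/hillday/langgraph-media-agent | app/pipeline_tools.py | _select_uploaded_images
-- ===== SOURCE A (Python) =====
-- def _select_uploaded_images(uploaded_images: list[str], indexes: list[int]) -> list[str]:
--     selected: list[str] = []
--     seen: set[int] = set()
--     for index in indexes:
--         if 0 <= index < len(uploaded_images) and index not in seen:
--             selected.append(uploaded_images[index])
--             seen.add(index)
--     return selected
-- ===== SOURCE B (Python) =====
-- def _select_uploaded_images(uploaded_images: list[str], indexes: list[int]) -> list[str]:
--     selected: list[str] = []
--     pending = list(indexes)
--     while pending:
--         i = pending[0]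
--         if 0 <= i < len(uploaded_images):
--             selected.append(uploaded_images[i])
--         pending = [j for j in pending[1:] if j != i]
--     return selected
-- ===== Notes on version B (the rewrite author's own statement) =====
-- stated objective: alternative
-- what changed: Replaced the single forward pass that carries a 'seen' set alongside the output with a worklist loop: repeatedly pop the first pending index, emit its image if in bounds, and purge all its remaining duplicates from the pending list, so no auxiliary seen structure exists.
import Mathlib
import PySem

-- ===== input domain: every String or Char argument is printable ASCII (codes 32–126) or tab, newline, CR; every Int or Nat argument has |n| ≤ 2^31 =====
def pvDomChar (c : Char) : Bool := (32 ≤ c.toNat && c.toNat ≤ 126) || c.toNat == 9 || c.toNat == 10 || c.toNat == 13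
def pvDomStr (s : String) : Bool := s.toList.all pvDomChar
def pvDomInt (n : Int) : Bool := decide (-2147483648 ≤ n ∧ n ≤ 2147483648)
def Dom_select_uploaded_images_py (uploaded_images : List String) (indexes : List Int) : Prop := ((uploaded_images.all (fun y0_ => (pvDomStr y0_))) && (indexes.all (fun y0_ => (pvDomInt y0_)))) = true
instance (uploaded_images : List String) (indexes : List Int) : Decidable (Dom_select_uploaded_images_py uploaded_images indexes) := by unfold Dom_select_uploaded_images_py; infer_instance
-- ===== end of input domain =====

-- B replaces A's seen-set single pass by a worklist loop that pops the head index and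
-- purges its duplicates from the remaining pending list; objective: alternative, same result.

-- ===== PORT A =====
-- fused loop: one pass over indexes carrying (selected, seen)
def select_uploaded_images_py (uploaded_images : List String) (indexes : List Int) : List String :=
  (indexes.foldl
    (fun (st : List String × PySem.Set Int) index =>
      if 0 ≤ index ∧ index < (uploaded_images.length : Int) ∧ index ∉ st.2 then
        (st.1 ++ [PySem.List.pyGetD uploaded_images index ""], PySem.Set.add st.2 index)
      else st)
    (([] : List String), (PySem.Set.empty : PySem.Set Int))).1

-- ===== PORT B =====
-- while pending: pop i = pending[0]; emit uploaded_images[i] if 0 <= i < len; pending = [j for j in pending[1:] if j != i]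
def pvAltLoop (uploaded_images : List String) (selected : List String) :
    List Int → List String
  | [] => selected
  | i :: rest =>
      pvAltLoop uploaded_images
        (if 0 ≤ i ∧ i < (uploaded_images.length : Int)
          then selected ++ [PySem.List.pyGetD uploaded_images i ""] else selected)
        (rest.filter (fun j => !(j == i)))
  termination_by pending => pending.length
  decreasing_by
    simp only [List.length_cons, List.length_unattach]
    exact Nat.lt_succ_of_le (le_trans (List.length_filter_le _ _) (le_of_eq (List.length_attach)))

def select_uploaded_images_py_alt (uploaded_images : List String) (indexes : List Int) : List String :=
  pvAltLoop uploaded_images [] indexes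

-- ===== PRECONDITION & SPEC =====
def Spec_select_uploaded_images_py (uploaded_images : List String) (indexes : List Int) (out : List String) : Prop := out = select_uploaded_images_py_alt uploaded_images indexes
instance (uploaded_images : List String) (indexes : List Int) (out : List String) : Decidable (Spec_select_uploaded_images_py uploaded_images indexes out) := by unfold Spec_select_uploaded_images_py; infer_instance

-- ===== CLAIM (what is proved, stated in full; the proofs are below) =====
def Claim_equal_select_uploaded_images_py : Prop := ∀ (uploaded_images : List String) (indexes : List Int), Dom_select_uploaded_images_py uploaded_images indexes → Spec_select_uploaded_images_py uploaded_images indexes (select_uploaded_images_py uploaded_images indexes)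

-- ===== LEMMAS AND PROOFS =====

-- purging an OUT-OF-BOUNDS index from the worklist never changes B's output
lemma pvAltLoop_filter_invalid (u : List String) (i : Int)
    (hi : ¬ (0 ≤ i ∧ i < (u.length : Int))) :
    ∀ n, ∀ l : List Int, l.length ≤ n → ∀ acc,
      pvAltLoop u acc (l.filter (fun j => !(j == i))) = pvAltLoop u acc l := by
  intro n
  induction n with
  | zero =>
    intro l hl acc
    have : l = [] := List.eq_nil_of_length_eq_zero (Nat.le_zero.mp hl)
    subst this; simp
  | succ n ih =>
    intro l hl acc
    cases l with
    | nil => simp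
    | cons j rest =>
      by_cases hji : j = i
      · subst hji
        rw [List.filter_cons_of_neg (by simp)]
        rw [pvAltLoop, if_neg hi]
      · rw [List.filter_cons_of_pos (by simp [hji])]
        rw [pvAltLoop, pvAltLoop, List.filter_filter]
        have h2 := ih (rest.filter (fun a => !(a == j)))
          (le_trans (List.length_filter_le _ _) (Nat.le_of_succ_le_succ (by simpa using hl)))
          (if 0 ≤ j ∧ j < (u.length : Int) then acc ++ [PySem.List.pyGetD u j ""] else acc)
        rw [List.filter_filter] at h2
        have hfun : (fun a : Int => !(a == j) && !(a == i)) = (fun a : Int => !(a == i) && !(a == j)) :=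
          funext fun a => Bool.and_comm _ _
        rw [hfun]
        exact h2

-- loop invariant: A's fold, started with accumulator acc and a seen-set s that contains
-- only in-bounds indices, equals B's worklist loop started on idx purged of s
lemma select_loop_eq (u : List String) :
    ∀ (idx : List Int) (acc : List String) (s : PySem.Set Int),
      (∀ j ∈ s, 0 ≤ j ∧ j < (u.length : Int)) →
      (idx.foldl
        (fun (st : List String × PySem.Set Int) index =>
          if 0 ≤ index ∧ index < (u.length : Int) ∧ index ∉ st.2 then
            (st.1 ++ [PySem.List.pyGetD u index ""], PySem.Set.add st.2 index)
          else st)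
        (acc, s)).1
      = pvAltLoop u acc (idx.filter (fun j => !(decide (j ∈ s)))) := by
  intro idx
  induction idx with
  | nil => intro acc s _; simp [pvAltLoop]
  | cons i idx ih =>
    intro acc s hs
    rw [List.foldl_cons]
    by_cases hmem : i ∈ s
    · -- duplicate of an already-selected (hence in-bounds) index: both sides skip it
      rw [List.filter_cons_of_neg (by simp [hmem])]
      rw [if_neg (by intro h; exact h.2.2 hmem)]
      exact ih acc s hs
    · rw [List.filter_cons_of_pos (by simp [hmem])]
      by_cases hvalid : 0 ≤ i ∧ i < (u.length : Int)
      · rw [if_pos ⟨hvalid.1, hvalid.2, hmem⟩]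
        rw [pvAltLoop, if_pos hvalid]
        have hstep := ih (acc ++ [PySem.List.pyGetD u i ""]) (PySem.Set.add s i)
          (by intro j hj
              rcases (PySem.Set.mem_add _ _ _).mp hj with h | h
              · exact hs j h
              · exact h ▸ hvalid)
        rw [hstep]
        congr 1
        rw [List.filter_filter]
        apply List.filter_congr
        intro x _
        by_cases hx : x = i
        · simp [hx, PySem.Set.mem_add]
        · simp [hx, PySem.Set.mem_add]
      · rw [if_neg (by intro h; exact hvalid ⟨h.1, h.2.1⟩)]
        rw [pvAltLoop, if_neg hvalid]
        rw [pvAltLoop_filter_invalid u i hvalid (idx.filter (fun j => !(decide (j ∈ s)))).length _ le_rfl acc]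
        exact ih acc s hs

-- ===== VERDICT (by name: the statement is the Claim_ definition above) =====
theorem select_uploaded_images_py_spec : Claim_equal_select_uploaded_images_py := by
  intro u idx _
  unfold Spec_select_uploaded_images_py select_uploaded_images_py select_uploaded_images_py_alt
  rw [select_loop_eq u idx [] PySem.Set.empty (by intro j hj; simp [PySem.Set.empty] at hj)]
  congr 1
  apply List.filter_eq_self.mpr
  intro x _
  simp [PySem.Set.empty]
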